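-- pv_equiv track=rewrite | github.com/skaah/retrofus-API | api_dashboard_reporter.py | get_items_by_level
-- ===== SOURCE A (Python) =====
-- from typing import Dict, List
--
-- def get_items_by_level(items: List[Dict]) -> Dict[str, int]:
--     """Répartition des items par niveau"""
--     ranges = {}
--     for item in items:
--         level = item.get("level", 0)
--         range_start = (level // 20) * 20
--         range_key = f"{range_start}-{range_start+19}"
--         ranges[range_key] = ranges.get(range_key, 0) + 1
--     return dict(sorted(ranges.items(), key=lambda x: int(x[0].split('-')[0])))
-- ===== SOURCE B (Python) =====
-- def get_items_by_level(items):
--     """Répartition des items par niveau: sort the range starts once, then emit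
--     runs of equal starts in one streaming pass (no hash accumulator, no
--     int-parsing sort key)."""
--     starts = sorted((item.get("level", 0) // 20) * 20 for item in items)
--     result = {}
--     i, n = 0, len(starts)
--     while i < n:
--         s = starts[i]
--         j = i
--         while j < n and starts[j] == s:
--             j += 1
--         result[f"{s}-{s+19}"] = j - i
--         i = j
--     return result
-- ===== Notes on version B (the rewrite author's own statement) =====
-- stated objective: alternative
-- what changed: Replaces the hash-accumulator dict (keyed by the formatted range string) followed by a sort of the keys under an int-parsing lambda with a sort of all numeric range starts followed by one streaming run-length pass that emits the dict in ascending order, so the sort key parser disappears.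
import Mathlib
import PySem

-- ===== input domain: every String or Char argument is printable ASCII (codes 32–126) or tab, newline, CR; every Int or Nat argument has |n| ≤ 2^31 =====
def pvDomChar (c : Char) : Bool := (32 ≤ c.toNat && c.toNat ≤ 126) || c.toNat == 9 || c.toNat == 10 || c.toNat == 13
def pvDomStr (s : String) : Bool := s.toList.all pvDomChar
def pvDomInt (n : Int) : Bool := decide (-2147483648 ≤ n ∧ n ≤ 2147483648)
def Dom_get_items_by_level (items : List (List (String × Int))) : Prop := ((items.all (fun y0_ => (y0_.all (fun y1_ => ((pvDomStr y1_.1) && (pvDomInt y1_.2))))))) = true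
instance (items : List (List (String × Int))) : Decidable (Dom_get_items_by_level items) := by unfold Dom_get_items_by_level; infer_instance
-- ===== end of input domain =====

-- B replaces A's hash-accumulate-then-sort-keys strategy by sort-then-run-length-scan; return values proved equal on Pre_.

-- helper shared by both ports: the f-string f"{s}-{s+19}"
def pvRangeKey (s : Int) : String := PySem.Int.toStr s ++ "-" ++ PySem.Int.toStr (s + 19)

-- ===== PORT A =====
-- int(s) ported by hand (Horner fold over the character codes): exact on the nonempty
-- all-digit strings this sort key receives under Pre_get_items_by_level (range starts ≥ 0).
def pvIntOfDigits (s : String) : Int :=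
  s.toList.foldl (fun a c => a * 10 + ((c.toNat : Int) - 48)) 0

-- the sort key lambda x: int(x[0].split('-')[0]); the two defaults are never taken
-- (the separator "-" is non-empty and split always returns a non-empty list)
def pvKeyNum (s : String) : Int :=
  pvIntOfDigits ((PySem.List.pyGet? ((PySem.Str.split? s "-").getD []) 0).getD "")

def get_items_by_level (items : List (List (String × Int))) : List (String × Int) :=
  let ranges : PySem.Dict String Int :=
    items.foldl (fun d item =>
      let level := PySem.Dict.getD (PySem.Dict.mk item) "level" 0
      let range_start := PySem.Int.floordiv level 20 * 20
      let range_key := pvRangeKey range_start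
      PySem.Dict.insert d range_key (PySem.Dict.getD d range_key 0 + 1)) PySem.Dict.empty
  -- dict(sorted(...)): the sorted pairs carry pairwise-distinct keys, so under the
  -- assoc-list convention the dict is that list itself
  PySem.List.sorted (PySem.Dict.items ranges) (fun x => pvKeyNum x.1) false

-- ===== PORT B =====
-- the outer while loop of Source B: one streaming pass over the sorted starts,
-- each step consuming one maximal run of equal values (the inner while loop)
def pvAltGroup : List Int → List (String × Int)
  | [] => []
  | x :: xs =>
    (pvRangeKey x, (1 + (xs.takeWhile (fun y => y == x)).length : Int)) ::
      pvAltGroup (xs.dropWhile (fun y => y == x))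
termination_by l => l.length
decreasing_by
  simpa [Nat.lt_succ_iff] using List.length_dropWhile_le (fun y => y == x) xs

def get_items_by_level_alt (items : List (List (String × Int))) : List (String × Int) :=
  pvAltGroup (PySem.List.sorted
    (items.map (fun item => PySem.Int.floordiv (PySem.Dict.getD (PySem.Dict.mk item) "level" 0) 20 * 20))
    (fun x => x) false)

-- ===== PRECONDITION & SPEC =====
-- Pre_ excludes exactly the inputs on which A raises: an item with a negative level
-- makes its range key's first '-'-field empty, so the sort key's int('') raises ValueError.
def Pre_get_items_by_level (items : List (List (String × Int))) : Prop :=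
  ∀ item ∈ items, 0 ≤ PySem.Dict.getD (PySem.Dict.mk item) "level" 0

instance (items : List (List (String × Int))) : Decidable (Pre_get_items_by_level items) := by
  unfold Pre_get_items_by_level; infer_instance

def pvWitness_get_items_by_level : (List (List (String × Int))) :=
  [[("level", 5)], [], [("level", 25), ("hp", 3)], [("level", 5)]]

def Spec_get_items_by_level (items : List (List (String × Int))) (out : List (String × Int)) : Prop :=
  out = get_items_by_level_alt items

instance (items : List (List (String × Int))) (out : List (String × Int)) :
    Decidable (Spec_get_items_by_level items out) := by
  unfold Spec_get_items_by_level; infer_instance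

-- ===== CLAIM (what is proved, stated in full; the proofs are below) =====
def Claim_equal_get_items_by_level : Prop :=
  ∀ (items : List (List (String × Int))), Dom_get_items_by_level items →
    Pre_get_items_by_level items →
      Spec_get_items_by_level items (get_items_by_level items)

-- ===== LEMMAS AND PROOFS =====

-- my own decimal-digit writer, used to characterise Nat.toDigits 10
def pvDigits (n : Nat) : List Char :=
  if _h : n < 10 then [Nat.digitChar n]
  else pvDigits (n / 10) ++ [Nat.digitChar (n % 10)]
decreasing_by exact Nat.div_lt_self (by omega) (by norm_num)

theorem pvDigits_toDigitsCore (fuel : Nat) : ∀ (n : Nat) (acc : List Char), n < fuel →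
    Nat.toDigitsCore 10 fuel n acc = pvDigits n ++ acc := by
  induction fuel with
  | zero => intro n acc h; omega
  | succ f ih =>
    intro n acc h
    rw [Nat.toDigitsCore]
    by_cases h10 : n < 10
    · have hdiv : n / 10 = 0 := Nat.div_eq_of_lt h10
      simp only [hdiv]
      rw [pvDigits, dif_pos h10]
      simp [Nat.mod_eq_of_lt h10]
    · have hdiv : n / 10 ≠ 0 := by omega
      simp only [if_neg hdiv]
      have hlt : n / 10 < f := by
        have := Nat.div_lt_self (by omega : 0 < n) (by norm_num : 1 < 10)
        omega
      rw [ih _ _ hlt]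
      conv_rhs => rw [pvDigits, dif_neg h10]
      simp

theorem pvDigits_eq_toDigits (n : Nat) : Nat.toDigits 10 n = pvDigits n := by
  have := pvDigits_toDigitsCore (n + 1) n [] (by omega)
  simpa [Nat.toDigits] using this

theorem pvDigits_mem (n : Nat) : ∀ c ∈ pvDigits n, 48 ≤ c.toNat ∧ c.toNat ≤ 57 := by
  induction n using Nat.strong_induction_on with
  | _ n ih =>
    intro c hc
    by_cases h10 : n < 10
    · rw [pvDigits, dif_pos h10] at hc
      simp only [List.mem_singleton] at hc
      subst hc
      interval_cases n <;> decide
    · rw [pvDigits, dif_neg h10] at hc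
      rcases List.mem_append.mp hc with h | h
      · exact ih (n / 10) (Nat.div_lt_self (by omega) (by norm_num)) c h
      · simp only [List.mem_singleton] at h
        subst h
        have hm : n % 10 < 10 := Nat.mod_lt _ (by norm_num)
        set r := n % 10 with hr
        interval_cases r <;> decide

theorem pvDigits_horner (n : Nat) :
    (pvDigits n).foldl (fun a c => a * 10 + ((c.toNat : Int) - 48)) 0 = n := by
  induction n using Nat.strong_induction_on with
  | _ n ih =>
    by_cases h10 : n < 10
    · rw [pvDigits, dif_pos h10]
      simp only [List.foldl_cons, List.foldl_nil]
      have : (n.digitChar).toNat = 48 + n := by interval_cases n <;> decide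
      rw [this]; push_cast; ring
    · rw [pvDigits, dif_neg h10]
      rw [List.foldl_append]
      rw [ih (n / 10) (Nat.div_lt_self (by omega) (by norm_num))]
      simp only [List.foldl_cons, List.foldl_nil]
      have hm : n % 10 < 10 := Nat.mod_lt _ (by norm_num)
      have hm : n % 10 < 10 := Nat.mod_lt _ (by norm_num)
      have hchar : ((n % 10).digitChar).toNat = 48 + n % 10 := by
        set r := n % 10 with hr
        interval_cases r <;> decide
      rw [hchar]
      have hdm : n / 10 * 10 + n % 10 = n := by omega
      push_cast
      omega

theorem pvToChars_nonneg (v : Int) (hv : 0 ≤ v) : PySem.Int.toChars v = pvDigits v.toNat := by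
  rw [PySem.Int.toChars, if_neg (by omega), pvDigits_eq_toDigits]

theorem pvSplitGo_no_sep (l : List Char) : ∀ (f : Nat) (cur : List Char) (acc : List (List Char)),
    '-' ∉ l → l.length < f →
    PySem.Chars.splitOn.go ['-'] f l cur acc = acc.reverse ++ [cur.reverse ++ l] := by
  induction l with
  | nil =>
    intro f cur acc _ hf
    obtain ⟨n, rfl⟩ : ∃ n, f = n + 1 := ⟨f - 1, by omega⟩
    rw [PySem.Chars.splitOn.go]
    · simp
    · omega
  | cons c rest ih =>
    intro f cur acc hl hf
    obtain ⟨n, rfl⟩ : ∃ n, f = n + 1 := ⟨f - 1, by omega⟩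
    rw [PySem.Chars.splitOn.go]
    have hc : c ≠ '-' := fun h => hl (by simp [h])
    have hpre : ['-'].isPrefixOf (c :: rest) = false := by
      simp [List.isPrefixOf]
      exact fun h => absurd h.symm hc
    rw [hpre]
    simp only [Bool.false_eq_true, if_false]
    rw [ih n (c :: cur) acc (fun h => hl (List.mem_cons_of_mem _ h)) (by simpa using Nat.lt_of_succ_lt_succ hf)]
    simp

theorem pvSplitGo_once (dsB : List Char) (hB : '-' ∉ dsB) : ∀ (dsA : List Char)
    (f : Nat) (cur : List Char) (acc : List (List Char)), '-' ∉ dsA →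
    (dsA ++ '-' :: dsB).length < f →
    PySem.Chars.splitOn.go ['-'] f (dsA ++ '-' :: dsB) cur acc =
      acc.reverse ++ [cur.reverse ++ dsA, dsB] := by
  intro dsA
  induction dsA with
  | nil =>
    intro f cur acc _ hf
    obtain ⟨n, rfl⟩ : ∃ n, f = n + 1 := ⟨f - 1, by omega⟩
    simp only [List.nil_append]
    rw [PySem.Chars.splitOn.go]
    have hpre : ['-'].isPrefixOf ('-' :: dsB) = true := by simp [List.isPrefixOf]
    rw [hpre]
    simp only [if_true, List.drop_succ_cons, List.drop_zero, List.length_cons, List.length_nil]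
    rw [pvSplitGo_no_sep dsB n [] (cur.reverse :: acc) hB (by simpa using Nat.lt_of_succ_lt_succ hf)]
    simp
  | cons c t ih =>
    intro f cur acc hl hf
    obtain ⟨n, rfl⟩ : ∃ n, f = n + 1 := ⟨f - 1, by omega⟩
    simp only [List.cons_append]
    rw [PySem.Chars.splitOn.go]
    have hc : c ≠ '-' := fun h => hl (by simp [h])
    have hpre : ['-'].isPrefixOf (c :: (t ++ '-' :: dsB)) = false := by
      simp [List.isPrefixOf]
      exact fun h => absurd h.symm hc
    rw [hpre]
    simp only [Bool.false_eq_true, if_false]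
    rw [ih n (c :: cur) acc (fun h => hl (List.mem_cons_of_mem _ h)) (by simpa using Nat.lt_of_succ_lt_succ hf)]
    simp

theorem pvSplitOn_once (dsA dsB : List Char) (hA : '-' ∉ dsA) (hB : '-' ∉ dsB) :
    PySem.Chars.splitOn (dsA ++ '-' :: dsB) ['-'] = [dsA, dsB] := by
  rw [PySem.Chars.splitOn]
  rw [pvSplitGo_once dsB hB dsA _ [] [] hA (by omega)]
  simp

theorem pvNoDash (n : Nat) : '-' ∉ pvDigits n := by
  intro h
  have := pvDigits_mem n '-' h
  simp at this

theorem pvKeyNum_rangeKey (v : Int) (hv : 0 ≤ v) : pvKeyNum (pvRangeKey v) = v := by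
  have hA := pvNoDash v.toNat
  have hB := pvNoDash (v + 19).toNat
  have htl : (pvRangeKey v).toList = pvDigits v.toNat ++ '-' :: pvDigits (v + 19).toNat := by
    rw [pvRangeKey]
    rw [String.toList_append, String.toList_append]
    rw [PySem.Int.toList_toStr, PySem.Int.toList_toStr]
    rw [pvToChars_nonneg v hv, pvToChars_nonneg (v + 19) (by omega)]
    simp
  rw [pvKeyNum, PySem.Str.split?, PySem.Chars.split?]
  rw [show ("-" : String).toList = ['-'] from rfl]
  simp only [List.isEmpty_cons, Bool.false_eq_true, if_false]
  rw [htl, pvSplitOn_once _ _ hA hB]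
  simp only [List.map_cons, List.map_nil, Option.map_some, Option.getD_some]
  rw [PySem.List.pyGet?_zero_cons]
  simp only [Option.getD_some]
  rw [pvIntOfDigits]
  rw [show (String.ofList (pvDigits v.toNat)).toList = pvDigits v.toNat from by simp]
  rw [pvDigits_horner]
  omega

theorem pvKey_inj (a b : Int) (ha : 0 ≤ a) (hb : 0 ≤ b) (h : pvRangeKey a = pvRangeKey b) :
    a = b := by
  have := congrArg pvKeyNum h
  rwa [pvKeyNum_rangeKey a ha, pvKeyNum_rangeKey b hb] at this

theorem pvOfList_sublist (l : List Int) : (PySem.Set.ofList l).Sublist l := by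
  induction l with
  | nil => simp [PySem.Set.ofList]
  | cons x xs ih =>
    rw [PySem.Set.ofList_cons]
    refine List.Sublist.cons₂ x ?_
    refine List.Sublist.trans ?_ ih
    rw [PySem.Set.discard]
    exact List.filter_sublist

theorem pvPairwise_lt_ofList (l : List Int) (h : l.Pairwise (· ≤ ·)) :
    (PySem.Set.ofList l).Pairwise (· < ·) := by
  have hle : (PySem.Set.ofList l).Pairwise (· ≤ ·) := h.sublist (pvOfList_sublist l)
  have hne : (PySem.Set.ofList l).Pairwise (· ≠ ·) := PySem.Set.nodup_ofList l
  exact (hle.and hne).imp (fun ⟨h1, h2⟩ => lt_of_le_of_ne h1 h2)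

theorem pvDropWhile_head {α : Type} (p : α → Bool) : ∀ (l : List α) (h : α) (r : List α),
    l.dropWhile p = h :: r → p h = false := by
  intro l
  induction l with
  | nil => intro h r hd; simp [List.dropWhile] at hd
  | cons c t ih =>
    intro h r hd
    rw [List.dropWhile_cons] at hd
    by_cases hc : p c = true
    · rw [if_pos hc] at hd; exact ih h r hd
    · rw [if_neg hc] at hd
      obtain ⟨rfl, -⟩ := List.cons_eq_cons.mp hd
      simpa using hc

theorem pvDiscard_ofList (x : Int) (r : List Int) (hxr : x ∉ r) : ∀ (t : List Int),
    (∀ y ∈ t, y = x) → (PySem.Set.ofList (t ++ r)).discard x = PySem.Set.ofList r := by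
  intro t
  induction t with
  | nil =>
    intro _
    simp only [List.nil_append]
    rw [PySem.Set.discard]
    refine List.filter_eq_self.mpr ?_
    intro y hy
    have : y ≠ x := fun hyx => hxr (hyx ▸ (PySem.Set.mem_ofList r y).mp hy)
    simpa using this
  | cons c t' ih =>
    intro ht
    have hc : c = x := ht c (List.mem_cons_self ..)
    subst hc
    rw [List.cons_append, PySem.Set.ofList_cons]
    rw [ih (fun y hy => ht y (List.mem_cons_of_mem _ hy))]
    simp only [PySem.Set.discard]
    rw [List.filter_cons]
    simp only [beq_self_eq_true, Bool.not_true, Bool.false_eq_true, if_false]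
    refine List.filter_eq_self.mpr ?_
    intro y hy
    have hync : y ≠ c := fun hyx => hxr (hyx ▸ (PySem.Set.mem_ofList r y).mp hy)
    simpa using hync

theorem pvDropWhile_lt (x : Int) (xs : List Int) (hall : ∀ y ∈ xs, x ≤ y)
    (hpwxs : xs.Pairwise (· ≤ ·)) :
    ∀ y ∈ xs.dropWhile (fun y => y == x), x < y := by
  cases hd : xs.dropWhile (fun y => y == x) with
  | nil => intro y hy; simp at hy
  | cons h r' =>
    intro y hy
    have hhx : (h == x) = false := pvDropWhile_head _ xs h r' hd
    have hhne : h ≠ x := by simpa using hhx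
    have hhmem : h ∈ xs := (List.dropWhile_sublist _).mem (hd ▸ List.mem_cons_self ..)
    have hxh : x < h := lt_of_le_of_ne (hall h hhmem) (Ne.symm hhne)
    have hpwd : (h :: r').Pairwise (· ≤ ·) := hd ▸ (hpwxs.sublist (List.dropWhile_sublist _))
    rcases List.mem_cons.mp hy with rfl | hy'
    · exact hxh
    · exact lt_of_lt_of_le hxh ((List.pairwise_cons.mp hpwd).1 y hy')

theorem pvAltGroup_spec : ∀ (n : Nat) (l : List Int), l.length ≤ n → l.Pairwise (· ≤ ·) →
    pvAltGroup l = (PySem.Set.ofList l).map (fun v => (pvRangeKey v, (l.count v : Int))) := by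
  intro n
  induction n with
  | zero =>
    intro l hl _
    have : l = [] := List.eq_nil_of_length_eq_zero (by omega)
    subst this
    simp [pvAltGroup, PySem.Set.ofList]
  | succ m ih =>
    intro l hl hpw
    match l with
    | [] => simp [pvAltGroup, PySem.Set.ofList]
    | x :: xs =>
      set t := xs.takeWhile (fun y => y == x) with htdef
      set r := xs.dropWhile (fun y => y == x) with hrdef
      have hxs : xs = t ++ r := (List.takeWhile_append_dropWhile).symm
      have ht : ∀ y ∈ t, y = x := by
        intro y hy
        have := List.mem_takeWhile_imp hy
        simpa using this
      have hall : ∀ y ∈ xs, x ≤ y := (List.pairwise_cons.mp hpw).1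
      have hpwxs : xs.Pairwise (· ≤ ·) := (List.pairwise_cons.mp hpw).2
      have hpwr : r.Pairwise (· ≤ ·) := hpwxs.sublist (List.dropWhile_sublist _)
      have hxr : ∀ y ∈ r, x < y := pvDropWhile_lt x xs hall hpwxs
      have hxnr : x ∉ r := fun h => absurd (hxr x h) (lt_irrefl x)
      have hset : PySem.Set.ofList (x :: xs) = x :: PySem.Set.ofList r := by
        rw [PySem.Set.ofList_cons, hxs, pvDiscard_ofList x r hxnr t ht]
      have hcountx : (x :: xs).count x = 1 + t.length := by
        rw [List.count_cons_self, hxs, List.count_append]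
        rw [List.count_eq_length.mpr (fun b hb => (ht b hb).symm)]
        rw [List.count_eq_zero.mpr hxnr]
        omega
      have hcounty : ∀ y ∈ r, (x :: xs).count y = r.count y := by
        intro y hy
        have hyx : y ≠ x := fun h => hxnr (h ▸ hy)
        rw [List.count_cons, hxs, List.count_append,
            List.count_eq_zero.mpr (fun hmem => hyx (ht y hmem))]
        simp [Ne.symm hyx]
      have hlen : r.length ≤ m := by
        have h1 : r.length ≤ xs.length := List.length_dropWhile_le _ _
        simp only [List.length_cons] at hl
        omega
      rw [pvAltGroup]
      rw [ih r hlen hpwr]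
      rw [hset]
      rw [List.map_cons]
      congr 1
      · rw [← htdef, hcountx]; push_cast; ring_nf
      · refine List.map_congr_left ?_
        intro y hy
        rw [hcounty y ((PySem.Set.mem_ofList r y).mp hy)]

-- sorted(set(l)) equals the (already ascending) first occurrences of sorted(l)
theorem pvSortedSet (starts : List Int) :
    PySem.List.sorted (PySem.Set.ofList starts) (fun x => x) false =
      PySem.Set.ofList (PySem.List.sorted starts (fun x => x) false) := by
  apply PySem.List.sorted_eq_of_perm_of_pairwise_lt
  · apply List.perm_of_nodup_nodup_toFinset_eq (PySem.Set.nodup_ofList _) (PySem.Set.nodup_ofList _)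
    ext a
    simp [PySem.Set.mem_ofList, PySem.List.mem_sorted]
  · exact pvPairwise_lt_ofList _ (PySem.List.sorted_pairwise starts (fun x => x))

theorem pvCount_map_key (v : Int) (hv : 0 ≤ v) : ∀ (l : List Int), (∀ a ∈ l, 0 ≤ a) →
    (l.map pvRangeKey).count (pvRangeKey v) = l.count v := by
  intro l
  induction l with
  | nil => simp
  | cons a l ih =>
    intro hl
    have ha : 0 ≤ a := hl a (List.mem_cons_self ..)
    rw [List.map_cons, List.count_cons, List.count_cons]
    rw [ih (fun b hb => hl b (List.mem_cons_of_mem _ hb))]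
    congr 1
    by_cases hav : a = v
    · subst hav; simp
    · have : pvRangeKey a ≠ pvRangeKey v := fun h => hav (pvKey_inj a v ha hv h)
      simp [hav, this]

theorem pvOfList_map_key : ∀ (l : List Int), (∀ a ∈ l, 0 ≤ a) →
    PySem.Set.ofList (l.map pvRangeKey) = (PySem.Set.ofList l).map pvRangeKey := by
  intro l
  induction l with
  | nil => simp [PySem.Set.ofList]
  | cons a l ih =>
    intro hl
    have ha : 0 ≤ a := hl a (List.mem_cons_self ..)
    rw [List.map_cons, PySem.Set.ofList_cons, PySem.Set.ofList_cons, List.map_cons]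
    rw [ih (fun b hb => hl b (List.mem_cons_of_mem _ hb))]
    congr 1
    rw [PySem.Set.discard, PySem.Set.discard]
    rw [List.filter_map]
    congr 1
    refine List.filter_congr ?_
    intro y hy
    have hy0 : 0 ≤ y := hl y (List.mem_cons_of_mem _ ((PySem.Set.mem_ofList l y).mp hy))
    by_cases hya : y = a
    · subst hya; simp
    · have : pvRangeKey y ≠ pvRangeKey a := fun h => hya (pvKey_inj y a hy0 ha h)
      simp [hya, this, Function.comp]

-- ===== VERDICT (by name: the statement is the Claim_ definition above) =====
theorem get_items_by_level_spec : Claim_equal_get_items_by_level := by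
  unfold Claim_equal_get_items_by_level
  intro items _ hpre
  unfold Spec_get_items_by_level get_items_by_level get_items_by_level_alt
  simp only []
  -- the range starts computed by both programs
  set startOf : List (String × Int) → Int :=
    fun item => PySem.Int.floordiv (PySem.Dict.getD (PySem.Dict.mk item) "level" 0) 20 * 20
    with hstartOf
  set starts : List Int := items.map startOf with hstarts
  have hns : ∀ a ∈ starts, 0 ≤ a := by
    intro a hmem
    obtain ⟨item, hitem, rfl⟩ := List.mem_map.mp hmem
    have h0 : 0 ≤ PySem.Dict.getD (PySem.Dict.mk item) "level" 0 := hpre item hitem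
    have h1 : 0 ≤ PySem.Int.floordiv (PySem.Dict.getD (PySem.Dict.mk item) "level" 0) 20 :=
      Int.fdiv_nonneg h0 (by norm_num)
    exact mul_nonneg h1 (by norm_num)
  set ss : List Int := PySem.List.sorted starts (fun x => x) false with hss
  have hssle : ss.Pairwise (· ≤ ·) := PySem.List.sorted_pairwise starts (fun x => x)
  have hssmem : ∀ a ∈ ss, 0 ≤ a := fun a ha =>
    hns a ((PySem.List.mem_sorted starts _ false a).mp ha)
  -- A's accumulator loop is Counter over the formatted keys
  have hfold : items.foldl (fun d item =>
      let level := PySem.Dict.getD (PySem.Dict.mk item) "level" 0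
      let range_start := PySem.Int.floordiv level 20 * 20
      let range_key := pvRangeKey range_start
      PySem.Dict.insert d range_key (PySem.Dict.getD d range_key 0 + 1)) PySem.Dict.empty
      = PySem.Dict.counter (starts.map pvRangeKey) := by
    rw [hstarts, List.map_map]
    rw [← PySem.Dict.foldl_insert_getD_add_one_eq_counter]
    rw [List.foldl_map]
    rfl
  rw [hfold, PySem.Dict.items_counter]
  rw [pvOfList_map_key starts hns, List.map_map]
  -- B's output, in closed form
  have hB : pvAltGroup ss =
      (PySem.Set.ofList ss).map (fun v => (pvRangeKey v, (ss.count v : Int))) :=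
    pvAltGroup_spec ss.length ss le_rfl hssle
  -- A's sort, named by sorted_eq_of_perm_of_pairwise_lt
  have hA : PySem.List.sorted
      ((PySem.Set.ofList starts).map
        ((fun k => (k, (List.count k (starts.map pvRangeKey) : Int))) ∘ pvRangeKey))
      (fun x => pvKeyNum x.1) false =
      (PySem.Set.ofList ss).map
        ((fun k => (k, (List.count k (starts.map pvRangeKey) : Int))) ∘ pvRangeKey) := by
    apply PySem.List.sorted_eq_of_perm_of_pairwise_lt
    · refine List.Perm.map _ ?_
      have h1 := pvSortedSet starts
      have h2 := PySem.List.sorted_perm (PySem.Set.ofList starts) (fun x => x) false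
      rw [h1] at h2
      exact h2
    · have hlt : (PySem.Set.ofList ss).Pairwise (· < ·) := pvPairwise_lt_ofList ss hssle
      rw [List.pairwise_map]
      refine hlt.imp_of_mem ?_
      intro a b hamem hbmem hab
      have ha0 : 0 ≤ a := hssmem a ((PySem.Set.mem_ofList ss a).mp hamem)
      have hb0 : 0 ≤ b := hssmem b ((PySem.Set.mem_ofList ss b).mp hbmem)
      simp only [Function.comp]
      rw [pvKeyNum_rangeKey a ha0, pvKeyNum_rangeKey b hb0]
      exact hab
  rw [hA, hB]
  refine List.map_congr_left ?_
  intro v hv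
  have hv0 : 0 ≤ v := hssmem v ((PySem.Set.mem_ofList ss v).mp hv)
  simp only [Function.comp]
  rw [pvCount_map_key v hv0 starts hns]
  rw [(PySem.List.sorted_perm starts (fun x => x) false).count_eq]
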